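-- pv_equiv track=rewrite | github.com/NacerEddine-19/PhishGuard-ML | api/app_lightweight.py | longest_digit_run
-- ===== SOURCE A (Python) =====
-- def longest_digit_run(text: str) -> int:
--     max_run = current = 0
--     for ch in text:
--         if ch.isdigit():
--             current += 1
--             max_run = max(max_run, current)
--         else:
--             current = 0
--     return max_run
-- ===== SOURCE B (Python) =====
-- def longest_digit_run(text: str) -> int:
--     best = 0
--     i = 0
--     n = len(text)
--     while i < n:
--         if text[i].isdigit():
--             j = i
--             while j < n and text[j].isdigit():
--                 j += 1
--             if j - i > best:
--                 best = j - i
--             i = j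
--         else:
--             i += 1
--     return best
-- ===== Notes on version B (the rewrite author's own statement) =====
-- stated objective: alternative
-- what changed: replaces the running current/max counter pair with a two-pointer run scanner that finds each maximal digit run's boundaries and takes the best run length
import Mathlib
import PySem

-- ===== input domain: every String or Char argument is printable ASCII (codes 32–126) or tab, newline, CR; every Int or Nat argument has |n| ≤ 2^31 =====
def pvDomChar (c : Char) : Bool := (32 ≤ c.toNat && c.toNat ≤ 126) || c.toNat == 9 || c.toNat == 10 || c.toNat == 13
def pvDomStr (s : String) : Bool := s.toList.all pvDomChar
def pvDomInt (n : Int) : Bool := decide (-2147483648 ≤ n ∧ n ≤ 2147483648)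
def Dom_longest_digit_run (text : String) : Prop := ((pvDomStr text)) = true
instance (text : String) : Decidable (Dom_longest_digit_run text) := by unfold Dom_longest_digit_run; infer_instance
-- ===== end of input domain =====

-- B is an alternative of the same cost: a two-pointer run scanner instead of A's running current/max counter pair.

-- ===== PORT A =====
-- for ch in text: if ch.isdigit(): current += 1; max_run = max(max_run, current) else: current = 0
def pvStepA (st : Int × Int) (ch : Char) : Int × Int :=
  if PySem.Chars.isdigit ch then (max st.1 (st.2 + 1), st.2 + 1) else (st.1, 0)

def longest_digit_run (text : String) : Int :=
  (text.toList.foldl pvStepA (0, 0)).1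

-- ===== PORT B =====
-- inner while loop of Source B: consume the maximal digit prefix, returning its length and the rest
def pvTakeDigits : List Char → Nat × List Char
  | [] => (0, [])
  | c :: t =>
    if PySem.Chars.isdigit c then
      let (n, r) := pvTakeDigits t
      (n + 1, r)
    else (0, c :: t)

theorem pvTakeDigits_len : ∀ (l : List Char), (pvTakeDigits l).2.length ≤ l.length := by
  intro l
  induction l with
  | nil => simp [pvTakeDigits]
  | cons c t ih =>
    simp only [pvTakeDigits]
    split
    · simpa using Nat.le_succ_of_le ih
    · simp

-- outer while loop of Source B: at a digit, scan the whole run and keep the best length; else advance one char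
def pvRunScan : List Char → Int
  | [] => 0
  | c :: t =>
    if PySem.Chars.isdigit c then
      let nr := pvTakeDigits t
      max ((nr.1 : Int) + 1) (pvRunScan nr.2)
    else pvRunScan t
termination_by l => l.length
decreasing_by
  · have := pvTakeDigits_len t
    simp only [List.length_cons]
    omega
  · simp

def longest_digit_run_alt (text : String) : Int :=
  pvRunScan text.toList

-- ===== PRECONDITION & SPEC =====
def Spec_longest_digit_run (text : String) (out : Int) : Prop := out = longest_digit_run_alt text
instance (text : String) (out : Int) : Decidable (Spec_longest_digit_run text out) := by unfold Spec_longest_digit_run; infer_instance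

-- ===== CLAIM (what is proved, stated in full; the proofs are below) =====
def Claim_equal_longest_digit_run : Prop := ∀ (text : String), Dom_longest_digit_run text → Spec_longest_digit_run text (longest_digit_run text)

-- ===== LEMMAS AND PROOFS =====

theorem pvRunScan_nonneg : ∀ (l : List Char), 0 ≤ pvRunScan l := by
  intro l
  induction l using pvRunScan.induct with
  | case1 => simp [pvRunScan]
  | case2 c t h nr ih =>
    simp only [pvRunScan, h, if_pos]
    exact le_max_of_le_right ih
  | case3 c t h ih => simpa [pvRunScan, h] using ih

-- folding A's step over an all-digit list just extends the counter
theorem foldA_digits (l : List Char) (hd : ∀ ch ∈ l, PySem.Chars.isdigit ch = true) :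
    ∀ (m c : Int), c ≤ m →
      l.foldl pvStepA (m, c) = (max m (c + l.length), c + l.length) := by
  induction l with
  | nil => intro m c h; simp [max_eq_left h]
  | cons a t ih =>
    intro m c h
    have ha : PySem.Chars.isdigit a = true := hd a (by simp)
    have ht : ∀ ch ∈ t, PySem.Chars.isdigit ch = true := fun ch hch => hd ch (by simp [hch])
    simp only [List.foldl_cons, pvStepA, ha, if_pos]
    rw [ih ht (max m (c + 1)) (c + 1) (le_max_right _ _)]
    simp only [Prod.mk.injEq, List.length_cons]
    constructor <;> (push_cast; omega)

-- pvTakeDigits splits off exactly the maximal all-digit prefix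
theorem pvTakeDigits_spec : ∀ (l : List Char), ∃ pre,
    (∀ ch ∈ pre, PySem.Chars.isdigit ch = true) ∧
    l = pre ++ (pvTakeDigits l).2 ∧ (pvTakeDigits l).1 = pre.length ∧
    (∀ d r', (pvTakeDigits l).2 = d :: r' → PySem.Chars.isdigit d = false) := by
  intro l
  induction l with
  | nil => exact ⟨[], by simp [pvTakeDigits]⟩
  | cons c t ih =>
    by_cases h : PySem.Chars.isdigit c = true
    · obtain ⟨pre, hpre, heq, hlen, hhd⟩ := ih
      refine ⟨c :: pre, ?_, ?_, ?_, ?_⟩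
      · intro ch hch
        rcases List.mem_cons.mp hch with rfl | hm
        · exact h
        · exact hpre ch hm
      · simp only [pvTakeDigits, h, if_pos]
        simpa using heq
      · simp only [pvTakeDigits, h, if_pos, List.length_cons]
        omega
      · intro d r' hr
        apply hhd d r'
        simpa [pvTakeDigits, h] using hr
    · have h' : PySem.Chars.isdigit c = false := by simpa using h
      refine ⟨[], by simp, ?_, ?_, ?_⟩
      · simp [pvTakeDigits, h']
      · simp [pvTakeDigits, h']
      · intro d r' hr
        simp only [pvTakeDigits, h', Bool.false_eq_true, if_neg, not_false_eq_true] at hr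
        obtain ⟨rfl, _⟩ := hr
        exact h'

-- main invariant: folding A over l from (m, 0) with 0 ≤ m yields max m (pvRunScan l)
theorem foldA_eq_runscan : ∀ (k : Nat) (l : List Char), l.length ≤ k → ∀ (m : Int), 0 ≤ m →
    (l.foldl pvStepA (m, 0)).1 = max m (pvRunScan l) := by
  intro k
  induction k with
  | zero =>
    intro l hl m hm
    have : l = [] := List.length_eq_zero_iff.mp (Nat.le_zero.mp hl)
    subst this
    simp [pvRunScan, max_eq_left hm]
  | succ k ih =>
    intro l hl m hm
    cases l with
    | nil => simp [pvRunScan, max_eq_left hm]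
    | cons c t =>
      have hlt : t.length ≤ k := by simpa using Nat.lt_succ_iff.mp (Nat.lt_of_lt_of_le (by simp) hl)
      by_cases h : PySem.Chars.isdigit c = true
      · obtain ⟨pre, hpre, heq, hlen, hhd⟩ := pvTakeDigits_spec t
        have hrlen : (pvTakeDigits t).2.length ≤ t.length := pvTakeDigits_len t
        -- LHS: step on c, then fold the digit prefix, then the rest
        have step1 : (c :: t).foldl pvStepA (m, 0) =
            (pvTakeDigits t).2.foldl pvStepA (max (max m 1) (1 + pre.length), 1 + pre.length) := by
          simp only [List.foldl_cons, pvStepA, h, if_pos]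
          conv_lhs => rw [heq, List.foldl_append]
          rw [foldA_digits pre hpre (max m (0 + 1)) (0 + 1) (le_max_right _ _)]
          congr 1
        have hrhs : pvRunScan (c :: t) = max ((pre.length : Int) + 1) (pvRunScan (pvTakeDigits t).2) := by
          simp only [pvRunScan, h, if_pos, hlen]
        rw [step1, hrhs]
        rcases hrc : (pvTakeDigits t).2 with _ | ⟨d, r'⟩
        · simp only [List.foldl_nil, pvRunScan]
          omega
        · have hd' : PySem.Chars.isdigit d = false := hhd d r' hrc
          have hr'len : r'.length ≤ k := by
            rw [hrc] at hrlen
            simp only [List.length_cons] at hrlen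
            omega
          simp only [List.foldl_cons, pvStepA, hd', Bool.false_eq_true, if_neg, not_false_eq_true]
          rw [ih r' hr'len _ (by positivity)]
          have h2 : pvRunScan (d :: r') = pvRunScan r' := by simp [pvRunScan, hd']
          rw [h2]
          omega
      · have h' : PySem.Chars.isdigit c = false := by simpa using h
        simp only [List.foldl_cons, pvStepA, h', Bool.false_eq_true, if_neg, not_false_eq_true]
        have : pvRunScan (c :: t) = pvRunScan t := by simp [pvRunScan, h']
        rw [this]
        exact ih t hlt m hm

-- ===== VERDICT (by name: the statement is the Claim_ definition above) =====
theorem longest_digit_run_spec : Claim_equal_longest_digit_run := by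
  intro text _
  unfold Spec_longest_digit_run longest_digit_run longest_digit_run_alt
  rw [foldA_eq_runscan text.toList.length text.toList le_rfl 0 le_rfl]
  exact max_eq_right (pvRunScan_nonneg _)
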